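-- pv_equiv track=rewrite | github.com/hpgross/self-ref-digital-numbers | functions.py | next_num
-- ===== SOURCE A (Python) =====
-- def indexer(input_char):
--     char_values={
--         "0":1110111,
--         "1":100100,
--         "2":1011101,
--         "3":1011011,
--         "4":111010,
--         "5":1101011,
--         "6":1101111,
--         "7":1010010,
--         "8":1111111,
--         "9":1111101
--     }
--     return char_values[input_char]
--
-- def next_num(cur_num):
--     num_str = str(cur_num)
--     while len(num_str) < 7:
--         num_str = "0" + num_str
--     counter = 0
--     for character in num_str:
--         counter += indexer(character)
--     return counter
-- ===== SOURCE B (Python) =====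
-- def next_num(cur_num):
--     vals = [1110111, 100100, 1011101, 1011011, 111010,
--             1101011, 1101111, 1010010, 1111111, 1111101]
--
--     def digit_sum_len(n):
--         # value-sum and digit-count of n (n >= 0), by arithmetic divmod -- no string
--         if n < 10:
--             return vals[n], 1
--         s, c = digit_sum_len(n // 10)
--         return s + vals[n % 10], c + 1
--
--     s, c = digit_sum_len(cur_num)
--     return s + max(0, 7 - c) * vals[0]
-- ===== Notes on version B (the rewrite author's own statement) =====
-- stated objective: alternative
-- what changed: B never converts the number to a string: it extracts digits arithmetically by recursive divmod-by-10 with a value table indexed by the digit itself, and accounts for A's leading-zero padding as a single closed-form product instead of A's pad-then-scan string loop.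
import Mathlib
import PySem

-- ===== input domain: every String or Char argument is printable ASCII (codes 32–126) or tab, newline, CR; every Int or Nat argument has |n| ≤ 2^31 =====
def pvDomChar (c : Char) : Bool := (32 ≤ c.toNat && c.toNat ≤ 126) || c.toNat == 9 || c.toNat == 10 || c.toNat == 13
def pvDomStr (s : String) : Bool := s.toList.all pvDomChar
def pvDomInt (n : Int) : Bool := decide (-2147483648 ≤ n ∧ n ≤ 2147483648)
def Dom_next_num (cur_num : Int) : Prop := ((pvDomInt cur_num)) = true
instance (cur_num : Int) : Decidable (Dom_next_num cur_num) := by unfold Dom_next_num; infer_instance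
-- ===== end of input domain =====

-- B extracts digits arithmetically (recursive divmod by 10, table indexed by the digit)
-- instead of A's str-convert / pad-with-'0' / scan; padding becomes one product.

-- ===== PORT A =====
-- char_values dict literal of A's indexer (keys are one-character strings, ported as Char)
def pvCharValues : PySem.Dict Char Int :=
  PySem.Dict.ofList [('0', 1110111), ('1', 100100), ('2', 1011101), ('3', 1011011),
    ('4', 111010), ('5', 1101011), ('6', 1101111), ('7', 1010010), ('8', 1111111), ('9', 1111101)]

-- indexer; char_values[c] raises KeyError on other chars (outside Pre_), total form getD 0
def pvIndexer (c : Char) : Int := pvCharValues.getD c 0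

-- while len(num_str) < 7: num_str = "0" + num_str
def pvPadA (s : List Char) : List Char :=
  if s.length < 7 then pvPadA ('0' :: s) else s
termination_by 7 - s.length

def next_num (cur_num : Int) : Int :=
  let num_str := PySem.Int.toChars cur_num
  let num_str := pvPadA num_str
  num_str.foldl (fun counter character => counter + pvIndexer character) 0

-- ===== PORT B =====
-- vals list of Source B
def pvVals : List Int :=
  [1110111, 100100, 1011101, 1011011, 111010, 1101011, 1101111, 1010010, 1111111, 1111101]

-- digit_sum_len: recursive divmod extraction; vals[i] (Python indexing) raises outside
-- range (outside Pre_), total form getD 0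
def pvDigitSumLen (n : Int) : Int × Int :=
  if n < 10 then ((PySem.List.pyGet? pvVals n).getD 0, 1)
  else
    let p := pvDigitSumLen (PySem.Int.floordiv n 10)
    (p.1 + (PySem.List.pyGet? pvVals (PySem.Int.mod n 10)).getD 0, p.2 + 1)
termination_by n.toNat
decreasing_by
  rename_i h
  rw [PySem.Int.floordiv, Int.fdiv_eq_ediv_of_nonneg _ (by norm_num)]
  omega

def next_num_alt (cur_num : Int) : Int :=
  let p := pvDigitSumLen cur_num
  p.1 + max 0 (7 - p.2) * 1110111

-- ===== PRECONDITION & SPEC =====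
-- A raises KeyError on the '-' of a negative number's string; excluded.
def Pre_next_num (cur_num : Int) : Prop := 0 ≤ cur_num
instance (cur_num : Int) : Decidable (Pre_next_num cur_num) := by unfold Pre_next_num; infer_instance
def pvWitness_next_num : Int := (123)

def Spec_next_num (cur_num : Int) (out : Int) : Prop := out = next_num_alt cur_num
instance (cur_num : Int) (out : Int) : Decidable (Spec_next_num cur_num out) := by unfold Spec_next_num; infer_instance

-- ===== CLAIM =====
def Claim_equal_next_num : Prop := ∀ (cur_num : Int), Dom_next_num cur_num → Pre_next_num cur_num → Spec_next_num cur_num (next_num cur_num)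

-- ===== LEMMAS AND PROOFS =====

-- pvPadA = prepend the missing zeros
theorem pvPadA_eq (s : List Char) : pvPadA s = List.replicate (7 - s.length) '0' ++ s := by
  by_cases h : s.length < 7
  · rw [pvPadA]
    simp only [h, if_true]
    rw [pvPadA_eq ('0' :: s)]
    have : 7 - s.length = (7 - (('0' :: s).length)) + 1 := by simp; omega
    rw [this, List.replicate_succ']
    simp
  · rw [pvPadA]
    simp only [h, if_false]
    have : 7 - s.length = 0 := by omega
    simp [this]
termination_by 7 - s.length

theorem pvFoldl_sum (s : List Char) (a : Int) :
    s.foldl (fun counter character => counter + pvIndexer character) a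
      = a + (s.map (fun c => pvCharValues.getD c 0)).sum := by
  induction s generalizing a with
  | nil => simp
  | cons c t ih =>
    simp only [List.foldl_cons, List.map_cons, List.sum_cons, ih]
    have : pvIndexer c = pvCharValues.getD c 0 := rfl
    rw [this]; ring

-- toDigitsCore with a longer accumulator
theorem pvToDigitsCore_acc (b : Nat) : ∀ (f n : Nat) (ds es : List Char),
    Nat.toDigitsCore b f n (ds ++ es) = Nat.toDigitsCore b f n ds ++ es := by
  intro f
  induction f with
  | zero => intro n ds es; simp [Nat.toDigitsCore]
  | succ f ih =>
    intro n ds es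
    simp only [Nat.toDigitsCore]
    split
    · simp
    · rw [show Nat.digitChar (n % b) :: (ds ++ es)
            = (Nat.digitChar (n % b) :: ds) ++ es from rfl, ih]

-- fuel independence above n
theorem pvToDigitsCore_fuel (b : Nat) (hb : 2 ≤ b) : ∀ (f f' n : Nat) (ds : List Char),
    n < f → n < f' → Nat.toDigitsCore b f n ds = Nat.toDigitsCore b f' n ds := by
  intro f
  induction f with
  | zero => intro f' n ds h; omega
  | succ f ih =>
    intro f' n ds h h'
    cases f' with
    | zero => omega
    | succ f' =>
      simp only [Nat.toDigitsCore]
      split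
      · rfl
      · have hn : 0 < n := by
          rcases Nat.eq_zero_or_pos n with h0 | h0
          · exfalso; rename_i hne; apply hne; simp [h0]
          · exact h0
        have hdiv : n / b < n := Nat.div_lt_self hn (by omega)
        exact ih f' (n / b) _ (by omega) (by omega)

theorem pvToDigits_small (n : Nat) (h : n < 10) : Nat.toDigits 10 n = [Nat.digitChar n] := by
  unfold Nat.toDigits
  simp [Nat.toDigitsCore, Nat.div_eq_of_lt h, Nat.mod_eq_of_lt h]


theorem pvToDigits_step (n : Nat) (h : 10 ≤ n) :
    Nat.toDigits 10 n = Nat.toDigits 10 (n / 10) ++ [Nat.digitChar (n % 10)] := by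
  unfold Nat.toDigits
  conv_lhs => simp only [Nat.toDigitsCore]
  have hne : ¬ n / 10 = 0 := by
    intro h0; have := Nat.lt_of_div_eq_zero (by omega) h0; omega
  simp only [hne, if_false]
  rw [show [Nat.digitChar (n % 10)] = ([] : List Char) ++ [Nat.digitChar (n % 10)] from rfl,
      pvToDigitsCore_acc]
  congr 1
  exact pvToDigitsCore_fuel 10 (by omega) n (n / 10 + 1) (n / 10) []
    (Nat.div_lt_self (by omega) (by omega)) (by omega)

-- digit value table agreement, digit by digit
theorem pvVal_agree : ∀ d : Nat, d < 10 →
    (PySem.List.pyGet? pvVals (d : Int)).getD 0 = pvCharValues.getD (Nat.digitChar d) 0 := by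
  decide

-- main invariant: the numeric recursion computes the string scan's sum and length
theorem pvDigitSumLen_eq (m : Nat) :
    pvDigitSumLen (m : Int)
      = (((Nat.toDigits 10 m).map (fun c => pvCharValues.getD c 0)).sum,
         ((Nat.toDigits 10 m).length : Int)) := by
  by_cases h : m < 10
  · rw [pvDigitSumLen.eq_def]
    have h' : ((m : Int) < 10) := by omega
    simp only [h', if_true]
    rw [pvVal_agree m h, pvToDigits_small m h]
    simp
  · rw [pvDigitSumLen.eq_def]
    have h' : ¬ ((m : Int) < 10) := by omega
    simp only [h', if_false]
    have hdiv : PySem.Int.floordiv (m : Int) 10 = ((m / 10 : Nat) : Int) := by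
      rw [PySem.Int.floordiv, Int.fdiv_eq_ediv_of_nonneg _ (by norm_num)]; omega
    have hmod : PySem.Int.mod (m : Int) 10 = ((m % 10 : Nat) : Int) := by
      rw [PySem.Int.mod, Int.fmod_eq_emod]; simp
    rw [hdiv, hmod, pvDigitSumLen_eq (m / 10), pvToDigits_step m (by omega),
        pvVal_agree (m % 10) (Nat.mod_lt m (by omega))]
    simp only [List.map_append, List.sum_append, List.map_cons, List.map_nil,
      List.sum_cons, List.sum_nil, List.length_append, List.length_cons,
      List.length_nil, Prod.mk.injEq]
    exact ⟨by ring, by push_cast; ring⟩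
termination_by m
decreasing_by exact Nat.div_lt_self (by omega) (by omega)

theorem pvToDigitsCore_le (b : Nat) : ∀ (f n : Nat) (ds : List Char),
    ds.length ≤ (Nat.toDigitsCore b f n ds).length := by
  intro f
  induction f with
  | zero => intro n ds; simp [Nat.toDigitsCore]
  | succ f ih =>
    intro n ds
    simp only [Nat.toDigitsCore]
    split
    · simp
    · calc ds.length ≤ (Nat.digitChar (n % b) :: ds).length := by simp
        _ ≤ _ := ih _ _

theorem pvToDigits_ne_nil (b n : Nat) : Nat.toDigits b n ≠ [] := by
  have h : 1 ≤ (Nat.toDigits b n).length := by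
    unfold Nat.toDigits
    simp only [Nat.toDigitsCore]
    split
    · simp
    · simpa using pvToDigitsCore_le b n (n / b) [Nat.digitChar (n % b)]
  intro h2; rw [h2] at h; simp at h

-- ===== VERDICT =====
theorem next_num_spec : Claim_equal_next_num := by
  intro cur_num _ hpre
  show next_num cur_num = next_num_alt cur_num
  obtain ⟨m, rfl⟩ : ∃ m : Nat, cur_num = (m : Int) :=
    ⟨cur_num.toNat, (Int.toNat_of_nonneg hpre).symm⟩
  have htc : PySem.Int.toChars (m : Int) = Nat.toDigits 10 m := by
    simp [PySem.Int.toChars, show ¬ (m : Int) < 0 by omega]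
  simp only [next_num, next_num_alt, htc, pvDigitSumLen_eq m]
  rw [pvPadA_eq, pvFoldl_sum]
  simp only [List.map_append, List.sum_append, List.map_replicate, List.sum_replicate]
  have h0 : pvCharValues.getD '0' 0 = 1110111 := rfl
  rw [h0]
  have hlen : 1 ≤ (Nat.toDigits 10 m).length := by
    cases h : Nat.toDigits 10 m with
    | nil => exact absurd h (pvToDigits_ne_nil 10 m)
    | cons _ _ => simp
  have : (max 0 (7 - ((Nat.toDigits 10 m).length : Int)))
      = ((7 - (Nat.toDigits 10 m).length : Nat) : Int) := by omega
  rw [this]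
  simp
  ring
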